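-- pv_equiv track=rewrite | github.com/sleirsgoevy/nontexed | src/nontexed/__init__.py | skip_braces
-- ===== SOURCE A (Python) =====
-- def skip_braces(s, i):
--     brlevel = 0
--     ch = None
--     prev = None
--     first = True
--     while brlevel or ch or first:
--         first = False
--         if s[i] == ch and prev != '\\': ch = None
--         elif ch != None: pass
--         elif s[i] in '"'"'": ch = s[i]
--         elif s[i] in '([{': brlevel += 1
--         elif s[i] in '}])': brlevel -= 1
--         prev = s[i]
--         i += 1
--     return i
-- ===== SOURCE B (Python) =====
-- def skip_braces(s, i):
--     brlevel = 0
--     first = True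
--     while brlevel or first:
--         first = False
--         c = s[i]
--         i += 1
--         if c in '([{':
--             brlevel += 1
--         elif c in '}])':
--             brlevel -= 1
--         elif c in '"\'':
--             prev = c
--             while True:
--                 d = s[i]
--                 i += 1
--                 if d == c and prev != '\\':
--                     break
--                 prev = d
--     return i
-- ===== Notes on version B (the rewrite author's own statement) =====
-- stated objective: alternative
-- what changed: A's flat single-loop state machine with four state variables (brlevel, ch, prev, first) is restructured into an outer loop tracking only the brace level plus a dedicated inner loop that scans quoted sections to their unescaped closing quote, eliminating the ch and prev variables from the top-level loop.
import Mathlib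
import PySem

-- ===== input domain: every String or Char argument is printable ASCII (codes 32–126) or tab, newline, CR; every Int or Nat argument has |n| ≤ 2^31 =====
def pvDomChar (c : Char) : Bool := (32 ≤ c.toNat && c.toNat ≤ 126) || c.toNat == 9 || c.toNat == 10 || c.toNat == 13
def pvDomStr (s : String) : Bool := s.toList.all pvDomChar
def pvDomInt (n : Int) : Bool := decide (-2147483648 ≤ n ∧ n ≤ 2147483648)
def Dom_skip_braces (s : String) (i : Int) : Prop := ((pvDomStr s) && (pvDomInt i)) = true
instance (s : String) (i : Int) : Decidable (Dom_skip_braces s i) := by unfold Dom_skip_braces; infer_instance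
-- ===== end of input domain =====

-- B restructures A's flat 4-variable state machine (brlevel/ch/prev/first) into an outer brace
-- loop with a dedicated inner quote-scanning loop; same cost, objective: alternative decomposition.

-- ===== PORT A =====
-- literal port of A's while loop: state (brlevel, ch, prev, first, i); fuel only makes it total,
-- none = IndexError (excluded by Pre_) or fuel exhaustion (never reached: fuel bounds the steps).
def pvSkipALoop (s : String) (fuel : Nat) (brlevel : Int) (ch : Option Char)
    (prev : Option Char) (first : Bool) (i : Int) : Option Int :=
  match fuel with
  | 0 => none
  | fuel + 1 =>
    if brlevel ≠ 0 ∨ ch.isSome = true ∨ first = true then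
      match PySem.Str.pyGet? s i with
      | none => none
      | some c =>
        let st : Int × Option Char :=
          if some c = ch ∧ prev ≠ some '\\' then (brlevel, none)
          else if ch ≠ none then (brlevel, ch)
          else if c = '"' ∨ c = '\'' then (brlevel, some c)
          else if c = '(' ∨ c = '[' ∨ c = '{' then (brlevel + 1, ch)
          else if c = '}' ∨ c = ']' ∨ c = ')' then (brlevel - 1, ch)
          else (brlevel, ch)
        pvSkipALoop s fuel st.1 st.2 (some c) false (i + 1)
    else some i

def skip_braces (s : String) (i : Int) : Int :=
  (pvSkipALoop s (s.length + i.natAbs + 1) 0 none none true i).getD 0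

-- ===== PORT B =====
-- Source B's nested loops: the outer loop tracks only the brace level; on a quote it enters the
-- inner loop, which scans to the unescaped matching quote and then breaks back to the outer loop
-- (here: calls it with the remaining fuel). Fuel is only the totality guard; none = IndexError.
mutual
def pvSkipBOuter (s : String) (fuel : Nat) (brlevel : Int) (first : Bool) (i : Int) : Option Int :=
  match fuel with
  | 0 => none
  | fuel + 1 =>
    if brlevel ≠ 0 ∨ first = true then
      match PySem.Str.pyGet? s i with
      | none => none
      | some c =>
        if c = '(' ∨ c = '[' ∨ c = '{' then pvSkipBOuter s fuel (brlevel + 1) false (i + 1)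
        else if c = '}' ∨ c = ']' ∨ c = ')' then pvSkipBOuter s fuel (brlevel - 1) false (i + 1)
        else if c = '"' ∨ c = '\'' then pvSkipBInner s fuel c c (i + 1) brlevel
        else pvSkipBOuter s fuel brlevel false (i + 1)
    else some i

def pvSkipBInner (s : String) (fuel : Nat) (c : Char) (prev : Char) (i : Int) (brlevel : Int) : Option Int :=
  match fuel with
  | 0 => none
  | fuel + 1 =>
    match PySem.Str.pyGet? s i with
    | none => none
    | some d =>
      if d = c ∧ prev ≠ '\\' then pvSkipBOuter s fuel brlevel false (i + 1)
      else pvSkipBInner s fuel c d (i + 1) brlevel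
end

def skip_braces_alt (s : String) (i : Int) : Int :=
  (pvSkipBOuter s (s.length + i.natAbs + 1) 0 true i).getD 0

-- ===== PRECONDITION & SPEC =====
-- state fold used only to state Pre_: (brace level, current quote with the previous char)
def pvBraceStep (st : Int × Option (Char × Char)) (c : Char) : Int × Option (Char × Char) :=
  match st with
  | (lvl, some qp) => if c = qp.1 ∧ qp.2 ≠ '\\' then (lvl, none) else (lvl, some (qp.1, c))
  | (lvl, none) =>
    if c = '"' ∨ c = '\'' then (lvl, some (c, c))
    else if c = '(' ∨ c = '[' ∨ c = '{' then (lvl + 1, none)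
    else if c = ')' ∨ c = ']' ∨ c = '}' then (lvl - 1, none)
    else (lvl, none)

-- the characters Python reads from position i onward (a negative i wraps once past -1 to 0)
def pvStream (s : String) (i : Int) : List Char :=
  if 0 ≤ i then s.toList.drop i.toNat
  else s.toList.drop (s.toList.length - i.natAbs) ++ s.toList

-- Pre_ = exactly the inputs on which A's scan reaches a neutral state (brace level 0, no open
-- quote) after at least one character and before running off the end of the string, i.e. exactly
-- where the Python A returns instead of raising IndexError.
def Pre_skip_braces (s : String) (i : Int) : Prop :=
  -(s.length : Int) ≤ i ∧
    ∃ k < (pvStream s i).length,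
      ((pvStream s i).take (k + 1)).foldl pvBraceStep (0, none) = (0, none)
instance (s : String) (i : Int) : Decidable (Pre_skip_braces s i) := by
  unfold Pre_skip_braces; infer_instance

def pvWitness_skip_braces : String × Int := ("(a)", 0)

def Spec_skip_braces (s : String) (i : Int) (out : Int) : Prop := out = skip_braces_alt s i
instance (s : String) (i : Int) (out : Int) : Decidable (Spec_skip_braces s i out) := by
  unfold Spec_skip_braces; infer_instance

-- ===== CLAIM (what is proved, stated in full; the proofs are below) =====
def Claim_equal_skip_braces : Prop := ∀ (s : String) (i : Int), Dom_skip_braces s i → Pre_skip_braces s i → Spec_skip_braces s i (skip_braces s i)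

-- ===== LEMMAS AND PROOFS =====

-- Simulation, proved for BOTH shapes of A's quote state simultaneously by induction on fuel:
-- with no open quote A's loop is B's outer loop (A's prev is then never read), and with an open
-- quote q and previous character p it is B's inner loop.  The equality holds for EVERY fuel, so
-- it needs no precondition; the claim's Pre_ only matches the ports to the raising Python.
theorem pvSkip_sim (s : String) (fuel : Nat) :
    (∀ (brlevel : Int) (prev : Option Char) (first : Bool) (i : Int),
        pvSkipALoop s fuel brlevel none prev first i = pvSkipBOuter s fuel brlevel first i) ∧
    (∀ (brlevel : Int) (q p : Char) (i : Int),
        pvSkipALoop s fuel brlevel (some q) (some p) false i =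
          pvSkipBInner s fuel q p i brlevel) := by
  induction fuel with
  | zero =>
    constructor <;> intros <;> simp [pvSkipALoop, pvSkipBOuter, pvSkipBInner]
  | succ f ih =>
    obtain ⟨ih1, ih2⟩ := ih
    constructor
    · intro brlevel prev first i
      unfold pvSkipALoop pvSkipBOuter
      by_cases hc : brlevel ≠ 0 ∨ first = true
      · rw [if_pos (by simpa using hc), if_pos hc]
        cases hg : PySem.Str.pyGet? s i with
        | none => rfl
        | some c =>
          by_cases hq : c = '"' ∨ c = '\''
          · rcases hq with rfl | rfl
            · exact ih2 brlevel '"' '"' (i + 1)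
            · exact ih2 brlevel '\'' '\'' (i + 1)
          · by_cases ho : c = '(' ∨ c = '[' ∨ c = '{'
            · rcases ho with rfl | rfl | rfl <;> exact ih1 _ _ _ _
            · by_cases hcl : c = '}' ∨ c = ']' ∨ c = ')'
              · rcases hcl with rfl | rfl | rfl <;> exact ih1 _ _ _ _
              · simp only [if_neg hq, if_neg ho, if_neg hcl]
                have h1 : ¬ (some c = (none : Option Char) ∧ prev ≠ some '\\') := by simp
                have h2 : ¬ ((none : Option Char) ≠ none) := by simp
                simp only [if_neg h1, if_neg h2]
                exact ih1 _ _ _ _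
      · rw [if_neg (by simpa using hc), if_neg hc]
    · intro brlevel q p i
      unfold pvSkipALoop pvSkipBInner
      rw [if_pos (show brlevel ≠ 0 ∨ (some q).isSome = true ∨ false = true from Or.inr (Or.inl rfl))]
      cases hg : PySem.Str.pyGet? s i with
      | none => rfl
      | some c =>
        by_cases hb : c = q ∧ p ≠ '\\'
        · have hb' : some c = some q ∧ (some p : Option Char) ≠ some '\\' := by
            refine ⟨by rw [hb.1], fun h => hb.2 (by injection h)⟩
          simp only [if_pos hb', if_pos hb]
          exact ih1 brlevel (some c) false (i + 1)
        · have hb' : ¬ (some c = some q ∧ (some p : Option Char) ≠ some '\\') := by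
            intro h
            exact hb ⟨by injection h.1, fun he => h.2 (by rw [he])⟩
          have h2 : (some q : Option Char) ≠ none := by simp
          simp only [if_neg hb', if_neg hb, if_pos h2]
          exact ih2 brlevel q c (i + 1)

theorem pvSkip_eq (s : String) (i : Int) : skip_braces s i = skip_braces_alt s i := by
  unfold skip_braces skip_braces_alt
  rw [(pvSkip_sim s (s.length + i.natAbs + 1)).1 0 none true i]

-- ===== VERDICT (by name: the statement is the Claim_ definition above) =====
theorem skip_braces_spec : Claim_equal_skip_braces := by
  intro s i _ _
  unfold Spec_skip_braces
  exact pvSkip_eq s i
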